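-- pv_equiv track=rewrite | github.com/StatNinja9305/Game_Badugi | submitting_on_Jan12/make_simulator_ver_a21.py | _get_string_of_set_of_cards
-- ===== SOURCE A (Python) =====
-- def _get_string_of_set_of_cards(deck, label = "Cards"):
--     message = "### ### %s start\n" % label
--     if len(deck) > 0:
--         for suit in ["c", "d", "h", "s"]:
--             cards = [card for card in deck if card[0] == suit]
--             message += "### " + "-".join(sorted(cards)) + "\n"
--     else:
--         message += "### ### <No Card>\n"
--     message += "### ### %s end\n" % label
--     return message
-- ===== SOURCE B (Python) =====
-- def _get_string_of_set_of_cards(deck, label = "Cards"):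
--     # One partition pass: group cards by first character, then four lookups.
--     groups = {}
--     for card in deck:
--         groups.setdefault(card[0], []).append(card)
--     lines = ["### ### %s start\n" % label]
--     if deck:
--         for suit in "cdhs":
--             lines.append("### " + "-".join(sorted(groups.get(suit, []))) + "\n")
--     else:
--         lines.append("### ### <No Card>\n")
--     lines.append("### ### %s end\n" % label)
--     return "".join(lines)
-- ===== Notes on version B (the rewrite author's own statement) =====
-- stated objective: idiomatic
-- what changed: B replaces A's four per-suit filtering scans over the whole deck with a single grouping pass that builds a dict keyed by each card's first character, followed by four dict lookups (and collects output lines in a list joined once instead of repeated string concatenation).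
import Mathlib
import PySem

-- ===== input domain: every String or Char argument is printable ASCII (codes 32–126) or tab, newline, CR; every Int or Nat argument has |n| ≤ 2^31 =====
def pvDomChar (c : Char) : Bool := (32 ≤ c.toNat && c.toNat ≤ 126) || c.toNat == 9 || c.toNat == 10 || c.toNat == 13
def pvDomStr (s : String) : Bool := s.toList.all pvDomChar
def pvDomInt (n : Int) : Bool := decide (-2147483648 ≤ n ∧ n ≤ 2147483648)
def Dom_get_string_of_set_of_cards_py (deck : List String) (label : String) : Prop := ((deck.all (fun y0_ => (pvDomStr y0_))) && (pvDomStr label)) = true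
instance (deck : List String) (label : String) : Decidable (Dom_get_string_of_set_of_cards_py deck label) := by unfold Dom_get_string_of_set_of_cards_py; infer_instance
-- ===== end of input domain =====

-- B groups the deck by first character in ONE pass into a dict and reads four suit buckets,
-- where A filters the whole deck once per suit; return values agree (idiomatic restructuring).

-- ===== PORT A =====
-- Literal port of A: suit strings "c","d","h","s" are ported as their single character;
-- card[0] == suit is Str.pyGet? card 0 == some suit (none = IndexError, excluded by Pre_).
def get_string_of_set_of_cards_py (deck : List String) (label : String) : String :=
  let message := "### ### " ++ label ++ " start\n"
  let message :=
    if deck.length > 0 then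
      (['c', 'd', 'h', 's'] : List Char).foldl
        (fun m suit =>
          let cards := deck.filter (fun card => PySem.Str.pyGet? card 0 == some suit)
          m ++ "### " ++ PySem.Str.join "-" (PySem.List.sorted cards (fun x => x) false) ++ "\n")
        message
    else
      message ++ "### ### <No Card>\n"
  message ++ "### ### " ++ label ++ " end\n"

-- ===== PORT B =====
-- Port of Source B: one grouping fold building a dict keyed by card[0]
-- (groups.setdefault(card[0], []).append(card) is Dict.modify card[0] [] (· ++ [card])),
-- then four lookups; output lines accumulated and joined once.
def get_string_of_set_of_cards_py_alt (deck : List String) (label : String) : String :=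
  let groups : PySem.Dict (Option Char) (List String) :=
    deck.foldl
      (fun d card => d.modify (PySem.Str.pyGet? card 0) [] (· ++ [card])) PySem.Dict.empty
  let lines := ["### ### " ++ label ++ " start\n"]
  let lines :=
    if deck ≠ [] then
      (['c', 'd', 'h', 's'] : List Char).foldl
        (fun ls suit =>
          ls ++ ["### " ++ PySem.Str.join "-"
                   (PySem.List.sorted (groups.getD (some suit) []) (fun x => x) false) ++ "\n"])
        lines
    else
      lines ++ ["### ### <No Card>\n"]
  let lines := lines ++ ["### ### " ++ label ++ " end\n"]
  PySem.Str.join "" lines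

-- ===== PRECONDITION & SPEC =====
-- Pre_ excludes decks containing an empty string: there A's card[0] raises IndexError (B raises too).
def Pre_get_string_of_set_of_cards_py (deck : List String) (_label : String) : Prop :=
  ∀ c ∈ deck, c ≠ ""
instance (deck : List String) (label : String) : Decidable (Pre_get_string_of_set_of_cards_py deck label) := by unfold Pre_get_string_of_set_of_cards_py; infer_instance

def pvWitness_get_string_of_set_of_cards_py : List String × String := (["c3", "h2", "d9", "c1"], "Cards")

def Spec_get_string_of_set_of_cards_py (deck : List String) (label : String) (out : String) : Prop := out = get_string_of_set_of_cards_py_alt deck label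
instance (deck : List String) (label : String) (out : String) : Decidable (Spec_get_string_of_set_of_cards_py deck label out) := by unfold Spec_get_string_of_set_of_cards_py; infer_instance

-- ===== CLAIM (what is proved, stated in full; the proofs are below) =====
def Claim_equal_get_string_of_set_of_cards_py : Prop := ∀ (deck : List String) (label : String), Dom_get_string_of_set_of_cards_py deck label → Pre_get_string_of_set_of_cards_py deck label → Spec_get_string_of_set_of_cards_py deck label (get_string_of_set_of_cards_py deck label)

-- ===== LEMMAS AND PROOFS =====

-- B's suit bucket equals A's per-suit filter of the deck.
theorem groups_getD_eq (deck : List String) (suit : Char) :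
    ((deck.foldl
        (fun (d : PySem.Dict (Option Char) (List String)) card =>
          d.modify (PySem.Str.pyGet? card 0) [] (· ++ [card]))
        PySem.Dict.empty).getD (some suit) [])
      = deck.filter (fun card => PySem.Str.pyGet? card 0 == some suit) := by
  have h := PySem.Dict.getD_foldl_modify_append
    (l := deck.map (fun c => (PySem.Str.pyGet? c 0, c)))
    (d := (PySem.Dict.empty : PySem.Dict (Option Char) (List String))) (c := some suit)
  rw [List.foldl_map] at h
  rw [h]
  simp [List.filter_map, Function.comp_def]

-- "".join is concatenation: intercalate with an empty separator is flatten.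
theorem intercalate_nil_sep {α : Type} (xs : List (List α)) :
    List.intercalate ([] : List α) xs = xs.flatten := by
  induction xs with
  | nil => rfl
  | cons x xs ih =>
    cases xs with
    | nil => simp [List.intercalate]
    | cons y ys =>
      simp only [List.intercalate, List.intersperse] at *
      simp_all [List.flatten]

-- ===== VERDICT (by name: the statement is the Claim_ definition above) =====
theorem get_string_of_set_of_cards_py_spec : Claim_equal_get_string_of_set_of_cards_py := by
  intro deck label _ _
  unfold Spec_get_string_of_set_of_cards_py get_string_of_set_of_cards_py get_string_of_set_of_cards_py_alt
  by_cases h : deck = []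
  · subst h
    apply String.toList_inj.mp
    simp [PySem.Str.toList_join, PySem.Chars.join, intercalate_nil_sep]
  · have hl : 0 < deck.length := List.length_pos_iff.mpr h
    simp only [groups_getD_eq, gt_iff_lt, hl, if_true, ne_eq, h, not_false_iff,
      List.foldl_cons, List.foldl_nil]
    apply String.toList_inj.mp
    simp [PySem.Str.toList_join, PySem.Chars.join, intercalate_nil_sep, List.append_assoc]
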